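-- pv_equiv track=rewrite | github.com/carpsesdema/AvA_Reborn | core/diff_engine.py | _group_related_changes
-- ===== SOURCE A (Python) =====
-- from typing import List, Dict, Tuple, Optional, Any
--
-- def _group_related_changes(line_changes: List[Dict]) -> List[List[Dict]]:
--     """Group related line changes together"""
--
--     if not line_changes:
--         return []
--
--     groups = []
--     current_group = [line_changes[0]]
--
--     for i in range(1, len(line_changes)):
--         current_change = line_changes[i]
--         last_change = current_group[-1]
--
--         # Check if changes are adjacent (within 3 lines)
--         current_line = current_change.get('line_number',
--                                           current_change.get('old_line', current_change.get('new_line', 0)))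
--         last_line = last_change.get('line_number', last_change.get('old_line', last_change.get('new_line', 0)))
--
--         if abs(current_line - last_line) <= 3:
--             current_group.append(current_change)
--         else:
--             groups.append(current_group)
--             current_group = [current_change]
--
--     groups.append(current_group)
--     return groups
-- ===== SOURCE B (Python) =====
-- def _group_related_changes(line_changes):
--     """Group related line changes together (built back-to-front)."""
--     def key(c):
--         return c.get('line_number', c.get('old_line', c.get('new_line', 0)))
--     groups = []
--     for c in reversed(line_changes):
--         if groups and abs(key(groups[0][0]) - key(c)) <= 3:
--             groups[0] = [c] + groups[0]
--         else:
--             groups.insert(0, [c])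
--     return groups
-- ===== Notes on version B (the rewrite author's own statement) =====
-- stated objective: alternative
-- what changed: B builds the groups back-to-front in a single reversed pass that prepends each change to the following group (comparing with that group's first element) instead of A's forward loop with a groups/current_group accumulator pair indexed by range(1, len).
import Mathlib
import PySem

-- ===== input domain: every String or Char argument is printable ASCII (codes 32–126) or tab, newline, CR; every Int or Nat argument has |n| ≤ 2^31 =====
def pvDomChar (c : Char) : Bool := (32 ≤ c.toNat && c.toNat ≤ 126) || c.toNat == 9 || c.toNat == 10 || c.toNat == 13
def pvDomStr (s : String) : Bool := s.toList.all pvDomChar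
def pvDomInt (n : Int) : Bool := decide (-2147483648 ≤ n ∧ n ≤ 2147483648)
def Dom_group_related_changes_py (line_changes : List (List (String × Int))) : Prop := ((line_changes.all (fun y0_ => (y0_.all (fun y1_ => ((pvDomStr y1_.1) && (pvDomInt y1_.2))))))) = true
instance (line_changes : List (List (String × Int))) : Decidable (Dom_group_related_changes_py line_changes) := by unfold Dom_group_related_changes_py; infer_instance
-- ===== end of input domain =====

-- B groups the changes back-to-front in one reversed pass (prepending to the following
-- group) instead of A's forward loop over indices with a groups/current_group pair:
-- a different decomposition of the same O(n) grouping, equal output everywhere.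

-- ===== PORT A =====
-- the nested .get fallback shared by both Pythons:
-- c.get('line_number', c.get('old_line', c.get('new_line', 0)))
def pvLineKey (c : List (String × Int)) : Int :=
  PySem.Dict.getD (PySem.Dict.ofList c) "line_number"
    (PySem.Dict.getD (PySem.Dict.ofList c) "old_line"
      (PySem.Dict.getD (PySem.Dict.ofList c) "new_line" 0))

-- A's loop body: state = (groups, current_group)
def pvStepA (st : List (List (List (String × Int))) × List (List (String × Int)))
    (current_change : List (String × Int)) :
    List (List (List (String × Int))) × List (List (String × Int)) :=
  let last_change := (PySem.List.pyGet? st.2 (-1)).getD []   -- current_group[-1]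
  let current_line := pvLineKey current_change
  let last_line := pvLineKey last_change
  if |current_line - last_line| ≤ 3 then (st.1, st.2 ++ [current_change])
  else (st.1 ++ [st.2], [current_change])

def group_related_changes_py (line_changes : List (List (String × Int))) : List (List (List (String × Int))) :=
  match line_changes with
  | [] => []
  | first :: rest =>
    let r := rest.foldl pvStepA ([], [first])
    r.1 ++ [r.2]

-- ===== PORT B =====
-- B's reversed-loop body: prepend c to the accumulated groups
def pvStepB (c : List (String × Int)) (groups : List (List (List (String × Int)))) :
    List (List (List (String × Int))) :=
  match groups with
  | [] => [[c]]
  | g :: gs =>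
    match g with
    | [] => [c] :: g :: gs
    | d :: _ => if |pvLineKey d - pvLineKey c| ≤ 3 then (c :: g) :: gs else [c] :: g :: gs

def group_related_changes_py_alt (line_changes : List (List (String × Int))) : List (List (List (String × Int))) :=
  line_changes.foldr pvStepB []

-- ===== PRECONDITION & SPEC =====
def Spec_group_related_changes_py (line_changes : List (List (String × Int))) (out : List (List (List (String × Int)))) : Prop := out = group_related_changes_py_alt line_changes
instance (line_changes : List (List (String × Int))) (out : List (List (List (String × Int)))) : Decidable (Spec_group_related_changes_py line_changes out) := by unfold Spec_group_related_changes_py; infer_instance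

-- ===== CLAIM (what is proved, stated in full; the proofs are below) =====
def Claim_equal_group_related_changes_py : Prop := ∀ (line_changes : List (List (String × Int))), Dom_group_related_changes_py line_changes → Spec_group_related_changes_py line_changes (group_related_changes_py line_changes)

-- ===== LEMMAS AND PROOFS =====

-- merging a pending current_group into the groups of the remaining suffix
def pvMerge (cur : List (List (String × Int))) (gs : List (List (List (String × Int)))) :
    List (List (List (String × Int))) :=
  match gs with
  | [] => [cur]
  | g :: gs' =>
    match g with
    | [] => cur :: g :: gs'
    | d :: _ =>
      if |pvLineKey d - pvLineKey (cur.getLast?.getD [])| ≤ 3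
      then (cur ++ g) :: gs' else cur :: g :: gs'

lemma pv_last_append (cur : List (List (String × Int))) (d : List (String × Int)) :
    (PySem.List.pyGet? (cur ++ [d]) (-1)).getD [] = d := by
  simp [PySem.List.pyGet?_neg_one_append_singleton]

lemma pv_main (rest : List (List (String × Int))) :
    ∀ (groups : List (List (List (String × Int)))) (cur : List (List (String × Int))),
      (rest.foldl pvStepA (groups, cur)).1 ++ [(rest.foldl pvStepA (groups, cur)).2]
        = groups ++ pvMerge cur (rest.foldr pvStepB []) := by
  induction rest with
  | nil => intro groups cur; simp [pvMerge]
  | cons d rest' ih =>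
    intro groups cur
    have hstep : pvStepA (groups, cur) d =
        if |pvLineKey d - pvLineKey (cur.getLast?.getD [])| ≤ 3
        then (groups, cur ++ [d]) else (groups ++ [cur], [d]) := by
      simp [pvStepA, PySem.List.pyGet?_neg_one]
    show ((d :: rest').foldl pvStepA (groups, cur)).1 ++ _ = _
    rw [List.foldl_cons, hstep]
    by_cases hc : |pvLineKey d - pvLineKey (cur.getLast?.getD [])| ≤ 3
    · rw [if_pos hc, ih]
      rcases hG : rest'.foldr pvStepB [] with _ | ⟨g, gs⟩
      · simp [pvMerge, pvStepB, hG, pv_last_append, hc]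
      · rcases g with _ | ⟨e, g'⟩
        · simp [pvMerge, pvStepB, hG, pv_last_append, hc]
        · by_cases he : |pvLineKey e - pvLineKey d| ≤ 3 <;>
            simp [pvMerge, pvStepB, hG, pv_last_append, hc, he]
    · rw [if_neg hc, ih]
      rcases hG : rest'.foldr pvStepB [] with _ | ⟨g, gs⟩
      · simp [pvMerge, pvStepB, hG, hc]
      · rcases g with _ | ⟨e, g'⟩
        · simp [pvMerge, pvStepB, hG, hc]
        · by_cases he : |pvLineKey e - pvLineKey d| ≤ 3 <;>
            simp [pvMerge, pvStepB, hG, hc, he, PySem.List.pyGet?_neg_one]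

lemma pv_merge_single (c : List (String × Int)) (G : List (List (List (String × Int)))) :
    pvMerge [c] G = pvStepB c G := by
  rcases G with _ | ⟨g, gs⟩
  · rfl
  · rcases g with _ | ⟨d, g'⟩
    · rfl
    · by_cases hd : |pvLineKey d - pvLineKey c| ≤ 3 <;>
        simp [pvMerge, pvStepB, hd, PySem.List.pyGet?_neg_one]

-- ===== VERDICT (by name: the statement is the Claim_ definition above) =====
theorem group_related_changes_py_spec : Claim_equal_group_related_changes_py := by
  intro line_changes _
  unfold Spec_group_related_changes_py
  cases line_changes with
  | nil => rfl
  | cons first rest =>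
    show (rest.foldl pvStepA ([], [first])).1 ++ [(rest.foldl pvStepA ([], [first])).2] = _
    rw [pv_main rest [] [first]]
    simp [group_related_changes_py_alt, pv_merge_single]
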